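-- pv_equiv track=rewrite | github.com/yufuin/baseline | datasets/conll04-ner/build.py | unnormalize
-- ===== SOURCE A (Python) =====
-- def unnormalize(words, do_comma=True, do_rb=True, do_cb=True, do_sb=True):
--     unnormalized = []
--     for word in words:
--         if do_comma and word == "COMMA": word = ","
--         if do_rb:
--             if word == "-LRB-": word = "("
--             if word == "-RRB-": word = ")"
--         if do_cb:
--             if word == "-LCB-": word = "{"
--             if word == "-RCB-": word = "}"
--         if do_sb:
--             if word == "-LSB-": word = "["
--             if word == "-RSB-": word = "]"
--         unnormalized.append(word)
--     return unnormalized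
-- ===== SOURCE B (Python) =====
-- def unnormalize(words, do_comma=True, do_rb=True, do_cb=True, do_sb=True):
--     # Staged whole-list rewrites: one full pass per enabled replacement pair,
--     # instead of per-word conditional chains. Correct because no replacement
--     # value is itself a placeholder token, so passes cannot interact.
--     pairs = []
--     if do_comma:
--         pairs.append(("COMMA", ","))
--     if do_rb:
--         pairs += [("-LRB-", "("), ("-RRB-", ")")]
--     if do_cb:
--         pairs += [("-LCB-", "{"), ("-RCB-", "}")]
--     if do_sb:
--         pairs += [("-LSB-", "["), ("-RSB-", "]")]
--     out = list(words)
--     for old, new in pairs: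
--         out = [new if w == old else w for w in out]
--     return out
-- ===== Notes on version B (the rewrite author's own statement) =====
-- stated objective: alternative
-- what changed: A makes one pass with seven per-word conditionals; B instead performs a sequence of whole-list rewrite passes, one per enabled replacement pair, each pass substituting a single token across the entire list (correct because no replacement value is itself a placeholder token, so passes commute with the per-word chain).
import Mathlib
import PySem

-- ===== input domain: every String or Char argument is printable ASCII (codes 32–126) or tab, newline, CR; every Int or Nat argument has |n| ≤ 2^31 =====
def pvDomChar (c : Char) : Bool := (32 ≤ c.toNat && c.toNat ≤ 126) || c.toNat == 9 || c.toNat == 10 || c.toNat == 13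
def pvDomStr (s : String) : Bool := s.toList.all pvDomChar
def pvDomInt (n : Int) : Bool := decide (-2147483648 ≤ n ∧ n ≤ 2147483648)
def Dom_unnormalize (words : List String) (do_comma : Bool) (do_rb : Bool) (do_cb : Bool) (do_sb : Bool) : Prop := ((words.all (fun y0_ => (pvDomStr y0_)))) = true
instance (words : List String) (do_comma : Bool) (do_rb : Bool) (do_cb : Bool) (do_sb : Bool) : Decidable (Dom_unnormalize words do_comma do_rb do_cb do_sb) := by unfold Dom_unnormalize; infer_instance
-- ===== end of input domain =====

-- B replaces A's single pass with seven per-word conditionals by a sequence of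
-- whole-list rewrite passes, one per enabled replacement pair (alternative
-- decomposition, same return values, same O(n) cost up to a small constant).

-- ===== PORT A =====
-- one loop iteration of A: the chain of reassigning ifs, in source order
def unnormalizeStep (do_comma do_rb do_cb do_sb : Bool) (word0 : String) : String :=
  let word := if do_comma && (word0 == "COMMA") then "," else word0
  let word := if do_rb && (word == "-LRB-") then "(" else word
  let word := if do_rb && (word == "-RRB-") then ")" else word
  let word := if do_cb && (word == "-LCB-") then "{" else word
  let word := if do_cb && (word == "-RCB-") then "}" else word
  let word := if do_sb && (word == "-LSB-") then "[" else word
  let word := if do_sb && (word == "-RSB-") then "]" else word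
  word

def unnormalize (words : List String) (do_comma : Bool) (do_rb : Bool) (do_cb : Bool) (do_sb : Bool) : List String :=
  words.foldl (fun acc word => acc ++ [unnormalizeStep do_comma do_rb do_cb do_sb word]) []

-- ===== PORT B =====
-- the list of enabled (old, new) pairs, built exactly as in Source B
def pvPairs (do_comma do_rb do_cb do_sb : Bool) : List (String × String) :=
  (if do_comma then [("COMMA", ",")] else []) ++
  (if do_rb then [("-LRB-", "("), ("-RRB-", ")")] else []) ++
  (if do_cb then [("-LCB-", "{"), ("-RCB-", "}")] else []) ++
  (if do_sb then [("-LSB-", "["), ("-RSB-", "]")] else [])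

-- one whole-list rewrite pass for a single pair
def pvPass (out : List String) (p : String × String) : List String :=
  out.map (fun w => if w == p.1 then p.2 else w)

def unnormalize_alt (words : List String) (do_comma : Bool) (do_rb : Bool) (do_cb : Bool) (do_sb : Bool) : List String :=
  (pvPairs do_comma do_rb do_cb do_sb).foldl pvPass words

-- ===== PRECONDITION & SPEC =====
def Spec_unnormalize (words : List String) (do_comma : Bool) (do_rb : Bool) (do_cb : Bool) (do_sb : Bool) (out : List String) : Prop := out = unnormalize_alt words do_comma do_rb do_cb do_sb
instance (words : List String) (do_comma : Bool) (do_rb : Bool) (do_cb : Bool) (do_sb : Bool) (out : List String) : Decidable (Spec_unnormalize words do_comma do_rb do_cb do_sb out) := by unfold Spec_unnormalize; infer_instance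

-- ===== CLAIM (what is proved, stated in full; the proofs are below) =====
def Claim_equal_unnormalize : Prop := ∀ (words : List String) (do_comma : Bool) (do_rb : Bool) (do_cb : Bool) (do_sb : Bool), Dom_unnormalize words do_comma do_rb do_cb do_sb → Spec_unnormalize words do_comma do_rb do_cb do_sb (unnormalize words do_comma do_rb do_cb do_sb)

-- ===== LEMMAS AND PROOFS =====

-- A's append-accumulator loop is a map
theorem unnormalize_eq_map (words : List String) (do_comma do_rb do_cb do_sb : Bool) :
    unnormalize words do_comma do_rb do_cb do_sb
      = words.map (unnormalizeStep do_comma do_rb do_cb do_sb) := by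
  unfold unnormalize
  induction words using List.reverseRecOn with
  | nil => rfl
  | append_singleton xs x ih => simp [ih]

-- per-word application of one pair
def pvApply (w : String) (p : String × String) : String := if w == p.1 then p.2 else w

-- B's sequence of whole-list passes is a single map of the per-word pair fold
theorem foldl_pass_eq_map (ps : List (String × String)) (ws : List String) :
    ps.foldl pvPass ws = ws.map (fun w => ps.foldl pvApply w) := by
  induction ps generalizing ws with
  | nil => simp
  | cons p ps ih =>
      simp only [List.foldl_cons, ih, pvPass, List.map_map]
      rfl

-- per-word agreement: folding the enabled pairs over a word equals A's if-chain
theorem fold_pairs_eq_step (do_comma do_rb do_cb do_sb : Bool) (w : String) :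
    (pvPairs do_comma do_rb do_cb do_sb).foldl pvApply w
      = unnormalizeStep do_comma do_rb do_cb do_sb w := by
  by_cases h1 : w = "COMMA"
  · subst h1; revert do_comma do_rb do_cb do_sb; decide
  by_cases h2 : w = "-LRB-"
  · subst h2; revert do_comma do_rb do_cb do_sb; decide
  by_cases h3 : w = "-RRB-"
  · subst h3; revert do_comma do_rb do_cb do_sb; decide
  by_cases h4 : w = "-LCB-"
  · subst h4; revert do_comma do_rb do_cb do_sb; decide
  by_cases h5 : w = "-RCB-"
  · subst h5; revert do_comma do_rb do_cb do_sb; decide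
  by_cases h6 : w = "-LSB-"
  · subst h6; revert do_comma do_rb do_cb do_sb; decide
  by_cases h7 : w = "-RSB-"
  · subst h7; revert do_comma do_rb do_cb do_sb; decide
  · cases do_comma <;> cases do_rb <;> cases do_cb <;> cases do_sb <;>
      simp [pvPairs, pvApply, unnormalizeStep, h1, h2, h3, h4, h5, h6, h7]

-- ===== VERDICT (by name: the statement is the Claim_ definition above) =====
theorem unnormalize_spec : Claim_equal_unnormalize := by
  intro words do_comma do_rb do_cb do_sb _
  show _ = _
  rw [unnormalize_eq_map, unnormalize_alt, foldl_pass_eq_map]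
  exact List.map_congr_left fun w _ =>
    (fold_pairs_eq_step do_comma do_rb do_cb do_sb w).symm
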